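-- pv_equiv track=rewrite | github.com/vivekdhir77/Castle-AI | palace_dqn.py | get_playable_cards
-- ===== SOURCE A (Python) =====
-- CARD_TYPE_IN_HAND = "In Hand"
--
-- CARD_TYPE_FACE_UP = "Face Up"
--
-- CARD_TYPE_FACE_DOWN = "Face Down"
--
-- def get_playable_cards(player_cards, seven_rule_active=False):
--     in_hand = [card for card in player_cards if card['type'] == CARD_TYPE_IN_HAND]
--     if in_hand:
--         return in_hand, CARD_TYPE_IN_HAND
--
--     face_up = [card for card in player_cards if card['type'] == CARD_TYPE_FACE_UP]
--     if face_up: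
--         return face_up, CARD_TYPE_FACE_UP
--
--     face_down = [card for card in player_cards if card['type'] == CARD_TYPE_FACE_DOWN]
--     return face_down, CARD_TYPE_FACE_DOWN
-- ===== SOURCE B (Python) =====
-- CARD_TYPE_IN_HAND = "In Hand"
-- CARD_TYPE_FACE_UP = "Face Up"
-- CARD_TYPE_FACE_DOWN = "Face Down"
--
-- def get_playable_cards(player_cards, seven_rule_active=False):
--     buckets = {CARD_TYPE_IN_HAND: [], CARD_TYPE_FACE_UP: [], CARD_TYPE_FACE_DOWN: []}
--     for card in player_cards:
--         t = card['type']
--         if t in buckets: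
--             buckets[t].append(card)
--     for t in (CARD_TYPE_IN_HAND, CARD_TYPE_FACE_UP):
--         if buckets[t]:
--             return buckets[t], t
--     return buckets[CARD_TYPE_FACE_DOWN], CARD_TYPE_FACE_DOWN
-- ===== Notes on version B (the rewrite author's own statement) =====
-- stated objective: alternative
-- what changed: Replaces A's three separate filtering passes over player_cards with one grouping pass into three type-keyed buckets followed by a priority check.
import Mathlib
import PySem

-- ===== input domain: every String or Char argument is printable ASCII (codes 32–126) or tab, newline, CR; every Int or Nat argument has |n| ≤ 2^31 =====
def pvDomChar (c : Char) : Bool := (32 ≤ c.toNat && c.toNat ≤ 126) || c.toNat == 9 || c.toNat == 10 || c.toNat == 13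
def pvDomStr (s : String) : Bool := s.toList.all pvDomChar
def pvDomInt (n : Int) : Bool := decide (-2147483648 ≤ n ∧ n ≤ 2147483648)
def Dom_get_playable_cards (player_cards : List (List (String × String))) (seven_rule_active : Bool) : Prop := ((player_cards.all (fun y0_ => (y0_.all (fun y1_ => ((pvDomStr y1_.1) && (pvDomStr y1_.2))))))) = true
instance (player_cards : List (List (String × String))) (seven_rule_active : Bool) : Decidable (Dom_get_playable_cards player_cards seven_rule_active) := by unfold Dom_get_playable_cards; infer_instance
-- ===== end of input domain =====

-- B replaces A's three filtering passes over player_cards with one grouping pass into three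
-- buckets followed by a priority check (objective: alternative, a single traversal instead of three).
-- A card dict is a List (String × String); card['type'] is first-match lookup. On Pre_ inputs
-- (every card has a "type" key) '(·.lookup "type").getD ""' is exact Python semantics.

-- ===== PORT A =====
def pvTypeOf (c : List (String × String)) : String := (c.lookup "type").getD ""

def get_playable_cards (player_cards : List (List (String × String))) (seven_rule_active : Bool) : (List (List (String × String))) × String :=
  let in_hand := player_cards.filter (fun c => pvTypeOf c == "In Hand")
  if in_hand ≠ [] then (in_hand, "In Hand")
  else
    let face_up := player_cards.filter (fun c => pvTypeOf c == "Face Up")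
    if face_up ≠ [] then (face_up, "Face Up")
    else
      let face_down := player_cards.filter (fun c => pvTypeOf c == "Face Down")
      (face_down, "Face Down")

-- ===== PORT B =====
-- one grouping step: drop a card into its bucket (unknown types are dropped)
def pvBucketStep (acc : List (List (String × String)) × List (List (String × String)) × List (List (String × String))) (c : List (String × String)) : List (List (String × String)) × List (List (String × String)) × List (List (String × String)) :=
  let t := pvTypeOf c
  if t == "In Hand" then (acc.1 ++ [c], acc.2.1, acc.2.2)
  else if t == "Face Up" then (acc.1, acc.2.1 ++ [c], acc.2.2)
  else if t == "Face Down" then (acc.1, acc.2.1, acc.2.2 ++ [c])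
  else acc

def get_playable_cards_alt (player_cards : List (List (String × String))) (seven_rule_active : Bool) : (List (List (String × String))) × String :=
  let buckets := player_cards.foldl pvBucketStep ([], [], [])
  if buckets.1 ≠ [] then (buckets.1, "In Hand")
  else if buckets.2.1 ≠ [] then (buckets.2.1, "Face Up")
  else (buckets.2.2, "Face Down")

-- ===== PRECONDITION & SPEC =====
-- Pre_ excludes exactly the inputs where Python's card['type'] raises KeyError (a card with no
-- "type" key); both A and B raise there.
def Pre_get_playable_cards (player_cards : List (List (String × String))) (seven_rule_active : Bool) : Prop :=
  (player_cards.all (fun c => (c.lookup "type").isSome)) = true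
instance (player_cards : List (List (String × String))) (seven_rule_active : Bool) : Decidable (Pre_get_playable_cards player_cards seven_rule_active) := by unfold Pre_get_playable_cards; infer_instance

def pvWitness_get_playable_cards : (List (List (String × String))) × Bool :=
  ([[("type", "Face Up"), ("rank", "7")], [("type", "Face Down")]], false)

def Spec_get_playable_cards (player_cards : List (List (String × String))) (seven_rule_active : Bool) (out : (List (List (String × String))) × String) : Prop := out = get_playable_cards_alt player_cards seven_rule_active
instance (player_cards : List (List (String × String))) (seven_rule_active : Bool) (out : (List (List (String × String))) × String) : Decidable (Spec_get_playable_cards player_cards seven_rule_active out) := by unfold Spec_get_playable_cards; infer_instance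

-- ===== CLAIM (what is proved, stated in full; the proofs are below) =====
def Claim_equal_get_playable_cards : Prop := ∀ (player_cards : List (List (String × String))) (seven_rule_active : Bool), Dom_get_playable_cards player_cards seven_rule_active → Pre_get_playable_cards player_cards seven_rule_active → Spec_get_playable_cards player_cards seven_rule_active (get_playable_cards player_cards seven_rule_active)

-- ===== LEMMAS AND PROOFS =====

-- the single grouping fold computes the three filtered lists of A
theorem pvBuckets_eq (pcs : List (List (String × String)))
    (h u d : List (List (String × String))) :
    pcs.foldl pvBucketStep (h, u, d) =
      (h ++ pcs.filter (fun c => pvTypeOf c == "In Hand"),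
       u ++ pcs.filter (fun c => pvTypeOf c == "Face Up"),
       d ++ pcs.filter (fun c => pvTypeOf c == "Face Down")) := by
  induction pcs generalizing h u d with
  | nil => simp
  | cons c cs ih =>
    simp only [List.foldl_cons, List.filter_cons]
    by_cases h1 : pvTypeOf c = "In Hand"
    · simp [pvBucketStep, h1, ih]
    · by_cases h2 : pvTypeOf c = "Face Up"
      · simp [pvBucketStep, h1, h2, ih]
      · by_cases h3 : pvTypeOf c = "Face Down"
        · simp [pvBucketStep, h1, h2, h3, ih]
        · simp [pvBucketStep, h1, h2, h3, ih]

-- ===== VERDICT (by name: the statement is the Claim_ definition above) =====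
theorem get_playable_cards_spec : Claim_equal_get_playable_cards := by
  intro pcs sra _ _
  unfold Spec_get_playable_cards get_playable_cards get_playable_cards_alt
  rw [pvBuckets_eq]
  simp
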